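-- pv_equiv track=rewrite | github.com/engutou/ICS-Effectiveness | main-code-data/merge_cpds.py | inconsistent_values
-- ===== SOURCE A (Python) =====
-- def inconsistent_values(names, values):
--     """
--     判断相同变量的取值是否存在不一致
--
--     参数:
--     names: List[str]，变量名称列表
--     values: List[any]，变量取值列表
--
--     返回:
--     bool: 若存在相同变量但取值不同，返回True；否则返回False
--     """
--     var_dict = {}
--
--     for name, value in zip(names, values):
--         if name in var_dict:
--             if var_dict[name] != value:
--                 return True
--         else:
--             var_dict[name] = value
--
--     return False
-- ===== SOURCE B (Python) =====
-- def inconsistent_values(names, values):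
--     """Group all values of each name into a list in one pass, then for each
--     group check whether any value differs from the group's first value."""
--     groups = {}
--     for name, value in zip(names, values):
--         groups.setdefault(name, []).append(value)
--     for vals in groups.values():
--         if any(v != vals[0] for v in vals[1:]):
--             return True
--     return False
-- ===== Notes on version B (the rewrite author's own statement) =====
-- stated objective: alternative
-- what changed: B replaces A's single pass with early-exit dict of first values by a group-then-scan decomposition: one pass builds a dict mapping each name to the list of all its values, then each group is checked for a value differing from its first.
import Mathlib
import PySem

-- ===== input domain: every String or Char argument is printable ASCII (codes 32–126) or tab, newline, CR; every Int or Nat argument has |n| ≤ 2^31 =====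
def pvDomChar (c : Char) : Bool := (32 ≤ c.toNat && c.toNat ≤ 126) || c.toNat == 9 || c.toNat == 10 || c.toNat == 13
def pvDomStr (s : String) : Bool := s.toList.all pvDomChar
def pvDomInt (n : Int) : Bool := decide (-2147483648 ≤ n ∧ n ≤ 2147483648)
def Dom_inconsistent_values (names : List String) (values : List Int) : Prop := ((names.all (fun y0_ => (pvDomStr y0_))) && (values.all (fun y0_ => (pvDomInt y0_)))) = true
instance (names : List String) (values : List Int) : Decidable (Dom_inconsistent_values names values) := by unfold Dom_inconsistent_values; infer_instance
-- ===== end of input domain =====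

-- B replaces A's single pass with an early-exit dict of first values by a group-then-scan
-- decomposition (dict of value lists, then per-group comparison against the first value); same cost.


-- ===== PORT A =====
-- A's loop over zip(names, values) carrying the dict of first-seen values, with early return True
def ivLoopA : List (String × Int) → PySem.Dict String Int → Bool
  | [], _ => false
  | p :: rest, d =>
    match d.get? p.1 with
    | some w => if w ≠ p.2 then true else ivLoopA rest d
    | none => ivLoopA rest (d.insert p.1 p.2)

def inconsistent_values (names : List String) (values : List Int) : Bool :=
  ivLoopA (names.zip values) PySem.Dict.empty

-- ===== PORT B =====
-- groups.setdefault(name, []).append(value) = modify name [] (· ++ [value]).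
-- vals[1:] is drop 1; 'any(v != vals[0] for v in vals[1:])' never evaluates vals[0] when
-- vals[1:] is empty (lazy generator), so 'headD 0' with an unused default is exact.
def inconsistent_values_alt (names : List String) (values : List Int) : Bool :=
  ((names.zip values).foldl
    (fun d p => d.modify p.1 [] (fun l => l ++ [p.2])) PySem.Dict.empty).values.any
      (fun vals => (vals.drop 1).any (fun v => decide (v ≠ vals.headD 0)))

-- ===== PRECONDITION & SPEC =====
def Spec_inconsistent_values (names : List String) (values : List Int) (out : Bool) : Prop := out = inconsistent_values_alt names values
instance (names : List String) (values : List Int) (out : Bool) : Decidable (Spec_inconsistent_values names values out) := by unfold Spec_inconsistent_values; infer_instance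

-- ===== CLAIM (what is proved, stated in full; the proofs are below) =====
def Claim_equal_inconsistent_values : Prop := ∀ (names : List String) (values : List Int), Dom_inconsistent_values names values → Spec_inconsistent_values names values (inconsistent_values names values)

-- ===== LEMMAS AND PROOFS =====

-- all values carried by name n in ps, in order (the group list B builds for n)
def pvCollect (ps : List (String × Int)) (n : String) : List Int :=
  (ps.filter (fun p => p.1 == n)).map (·.2)

lemma mem_pvCollect {ps : List (String × Int)} {n : String} {v : Int} :
    v ∈ pvCollect ps n ↔ (n, v) ∈ ps := by
  simp only [pvCollect, List.mem_map, List.mem_filter, beq_iff_eq]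
  constructor
  · rintro ⟨⟨a, b⟩, ⟨hm, rfl⟩, rfl⟩; exact hm
  · intro h; exact ⟨(n, v), ⟨h, rfl⟩, rfl⟩

lemma pvCollect_cons (p : String × Int) (ps : List (String × Int)) (n : String) :
    pvCollect (p :: ps) n = if p.1 = n then p.2 :: pvCollect ps n else pvCollect ps n := by
  by_cases h : p.1 = n
  · simp [pvCollect, h]
  · simp [pvCollect, h]

-- A's loop computes: some processed pair's value differs from the first value recorded for its name
lemma ivLoopA_eq (ps : List (String × Int)) (d : PySem.Dict String Int) :
    ivLoopA ps d =
      ps.any (fun p => decide ((d.get? p.1).getD ((pvCollect ps p.1).headD p.2) ≠ p.2)) := by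
  induction ps generalizing d with
  | nil => rfl
  | cons p rest ih =>
    rw [List.any_cons]
    cases hg : d.get? p.1 with
    | some w =>
      have hstep : ivLoopA (p :: rest) d = if w ≠ p.2 then true else ivLoopA rest d := by
        simp [ivLoopA, hg]
      have hhead : decide ((some w).getD ((pvCollect (p :: rest) p.1).headD p.2) ≠ p.2)
          = decide (w ≠ p.2) := rfl
      rw [hstep, hhead]
      by_cases hw : w = p.2
      · subst hw
        rw [if_neg (by simp), show decide (p.2 ≠ p.2) = false by simp, Bool.false_or, ih]
        refine PySem.List.any_congr_mem fun q hq => ?_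
        have harg : (d.get? q.1).getD ((pvCollect rest q.1).headD q.2)
            = (d.get? q.1).getD ((pvCollect (p :: rest) q.1).headD q.2) := by
          by_cases h1 : q.1 = p.1
          · rw [h1, hg]; rfl
          · rw [pvCollect_cons, if_neg (fun h => h1 h.symm)]
        rw [harg]
      · rw [if_pos hw, show decide (w ≠ p.2) = true by simpa using hw, Bool.true_or]
    | none =>
      have hstep : ivLoopA (p :: rest) d = ivLoopA rest (d.insert p.1 p.2) := by
        simp [ivLoopA, hg]
      have hhead : decide ((Option.none (α := Int)).getD ((pvCollect (p :: rest) p.1).headD p.2) ≠ p.2)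
          = false := by
        rw [pvCollect_cons, if_pos rfl]
        simp
      rw [hstep, hhead, Bool.false_or, ih]
      refine PySem.List.any_congr_mem fun q hq => ?_
      have harg : ((d.insert p.1 p.2).get? q.1).getD ((pvCollect rest q.1).headD q.2)
          = (d.get? q.1).getD ((pvCollect (p :: rest) q.1).headD q.2) := by
        by_cases h1 : q.1 = p.1
        · rw [h1, PySem.Dict.get?_insert_self, pvCollect_cons, if_pos rfl, hg]; rfl
        · rw [PySem.Dict.get?_insert_of_ne d p.2 h1, pvCollect_cons, if_neg (fun h => h1 h.symm)]
      rw [harg]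

lemma ivLoopA_empty (ps : List (String × Int)) :
    ivLoopA ps PySem.Dict.empty =
      ps.any (fun p => decide ((pvCollect ps p.1).headD p.2 ≠ p.2)) := by
  rw [ivLoopA_eq]
  simp [PySem.Dict.get?_empty]

-- B computes: some distinct name's group has an element differing from the group's head
lemma alt_eq (names : List String) (values : List Int) :
    inconsistent_values_alt names values =
      (PySem.Set.ofList ((names.zip values).map (·.1))).any
        (fun n => ((pvCollect (names.zip values) n).drop 1).any
          (fun v => decide (v ≠ (pvCollect (names.zip values) n).headD 0))) := by
  unfold inconsistent_values_alt
  set ps := names.zip values with hps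
  have hnd : ((ps.foldl (fun d p => d.modify p.1 [] (fun l => l ++ [p.2]))
      PySem.Dict.empty)).keys.Nodup := by
    exact PySem.Dict.nodup_keys_foldl_modify_key ps (·.1) [] (fun d p l => l ++ [p.2])
      PySem.Dict.empty (by simp)
  rw [PySem.Dict.values_eq_map_keys _ hnd []]
  rw [PySem.Dict.keys_foldl_modify_key]
  simp only [PySem.Dict.keys_empty, PySem.Set.update_nil_left, List.any_map]
  refine PySem.List.any_congr_mem (fun n hn => ?_)
  have : (ps.foldl (fun d p => d.modify p.1 [] (fun l => l ++ [p.2]))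
      PySem.Dict.empty).getD n [] = pvCollect ps n := by
    rw [PySem.Dict.getD_foldl_modify_append]
    simp [pvCollect, PySem.Dict.getD_empty]
  simp [Function.comp, this]

lemma any_eq_any (ps : List (String × Int)) :
    ps.any (fun p => decide ((pvCollect ps p.1).headD p.2 ≠ p.2)) =
      (PySem.Set.ofList (ps.map (·.1))).any
        (fun n => ((pvCollect ps n).drop 1).any
          (fun v => decide (v ≠ (pvCollect ps n).headD 0))) := by
  rw [Bool.eq_iff_iff]
  simp only [List.any_eq_true, decide_eq_true_eq, ne_eq]
  constructor
  · rintro ⟨⟨n, v⟩, hm, hne⟩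
    refine ⟨n, (PySem.Set.mem_ofList _ _).2 (List.mem_map_of_mem hm), ?_⟩
    have hv : v ∈ pvCollect ps n := mem_pvCollect.2 hm
    cases hc : pvCollect ps n with
    | nil => rw [hc] at hv; exact absurd hv (List.not_mem_nil)
    | cons h t =>
      rw [hc] at hv hne
      simp only [List.headD_cons] at hne
      have hvt : v ∈ t := by
        rcases List.mem_cons.1 hv with h1 | h1
        · exact absurd (h1 ▸ rfl) hne
        · exact h1
      exact ⟨v, by simpa using hvt, fun he => hne (he ▸ rfl)⟩
  · rintro ⟨n, hn, v, hv, hne⟩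
    cases hc : pvCollect ps n with
    | nil => rw [hc] at hv; exact absurd hv (by simp)
    | cons h t =>
      rw [hc] at hv hne
      simp only [List.headD_cons] at hne
      simp only [List.drop_one, List.tail_cons] at hv
      have hvm : v ∈ pvCollect ps n := by rw [hc]; exact List.mem_cons_of_mem _ hv
      refine ⟨(n, v), mem_pvCollect.1 hvm, ?_⟩
      rw [hc]
      simp only [List.headD_cons]
      exact fun he => hne (he ▸ rfl)

-- ===== VERDICT (by name: the statement is the Claim_ definition above) =====
theorem inconsistent_values_spec : Claim_equal_inconsistent_values := by
  intro names values _
  unfold Spec_inconsistent_values inconsistent_values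
  rw [ivLoopA_empty, alt_eq, any_eq_any]
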